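-- pv_equiv track=rewrite | github.com/dderyldowney/todowrite | afs_fastapi/database/can_time_series_storage.py | _map_address_to_equipment_type
-- ===== SOURCE A (Python) =====
-- def _map_address_to_equipment_type(source_address: int) -> str:
--     """Map source address to equipment type."""
--     address_ranges = {
--         (0x80, 0x87): "tractor",
--         (0x88, 0x8F): "harvester",
--         (0x90, 0x97): "sprayer",
--         (0x98, 0x9F): "tillage",
--     }
--
--     for (start, end), equipment_type in address_ranges.items():
--         if start <= source_address <= end:
--             return equipment_type
--
--     return "unknown"
-- ===== SOURCE B (Python) =====
-- def _map_address_to_equipment_type(source_address: int) -> str: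
--     """Map source address to equipment type."""
--     if 0x80 <= source_address <= 0x9F:
--         return ["tractor", "harvester", "sprayer", "tillage"][(source_address - 0x80) >> 3]
--     return "unknown"
-- ===== Notes on version B (the rewrite author's own statement) =====
-- stated objective: idiomatic
-- what changed: Replaces the linear scan over a range-keyed dict with a range guard plus closed-form arithmetic indexing ((addr-0x80)>>3) into a fixed list.
import Mathlib
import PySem

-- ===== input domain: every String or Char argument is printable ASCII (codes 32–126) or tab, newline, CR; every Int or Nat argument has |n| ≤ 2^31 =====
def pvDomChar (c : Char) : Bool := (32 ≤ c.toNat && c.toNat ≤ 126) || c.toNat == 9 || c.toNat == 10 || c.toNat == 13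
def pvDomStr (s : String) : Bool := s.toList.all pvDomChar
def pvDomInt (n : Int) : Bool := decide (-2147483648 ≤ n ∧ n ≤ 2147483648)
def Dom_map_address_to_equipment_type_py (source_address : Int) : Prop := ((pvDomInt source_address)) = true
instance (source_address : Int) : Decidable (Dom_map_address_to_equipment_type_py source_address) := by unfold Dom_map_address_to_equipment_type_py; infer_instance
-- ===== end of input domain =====

-- B replaces A's linear scan over a range-keyed dict with a range guard and
-- closed-form arithmetic indexing into a fixed list (idiomatic / O(1)).

-- ===== PORT A =====
-- the dict's (start, end) -> equipment_type pairs in insertion order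
def pvAddressRanges : List ((Int × Int) × String) :=
  [((0x80, 0x87), "tractor"), ((0x88, 0x8F), "harvester"),
   ((0x90, 0x97), "sprayer"), ((0x98, 0x9F), "tillage")]

-- the for-loop with early return; none = loop fell through
def pvScan (items : List ((Int × Int) × String)) (source_address : Int) : Option String :=
  match items with
  | [] => none
  | ((start, stop), equipment_type) :: rest =>
      if start ≤ source_address ∧ source_address ≤ stop then some equipment_type
      else pvScan rest source_address

def map_address_to_equipment_type_py (source_address : Int) : String :=
  (pvScan pvAddressRanges source_address).getD "unknown"

-- ===== PORT B =====
def map_address_to_equipment_type_py_alt (source_address : Int) : String :=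
  if 0x80 ≤ source_address ∧ source_address ≤ 0x9F then
    -- the guard makes the index 0..3, so the Python list index never raises;
    -- the getD default is unreachable
    (PySem.List.pyGet? ["tractor", "harvester", "sprayer", "tillage"]
      (PySem.Int.floordiv (source_address - 0x80) 8)).getD "unknown"
  else "unknown"

-- ===== PRECONDITION & SPEC =====
def Spec_map_address_to_equipment_type_py (source_address : Int) (out : String) : Prop := out = map_address_to_equipment_type_py_alt source_address
instance (source_address : Int) (out : String) : Decidable (Spec_map_address_to_equipment_type_py source_address out) := by unfold Spec_map_address_to_equipment_type_py; infer_instance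

-- ===== CLAIM (what is proved, stated in full; the proofs are below) =====
def Claim_equal_map_address_to_equipment_type_py : Prop := ∀ (source_address : Int), Dom_map_address_to_equipment_type_py source_address → Spec_map_address_to_equipment_type_py source_address (map_address_to_equipment_type_py source_address)

-- ===== LEMMAS AND PROOFS =====
theorem pv_eq (s : Int) :
    map_address_to_equipment_type_py s = map_address_to_equipment_type_py_alt s := by
  by_cases h : 0x80 ≤ s ∧ s ≤ 0x9F
  · obtain ⟨h1, h2⟩ := h
    interval_cases s <;> decide
  · simp only [map_address_to_equipment_type_py, map_address_to_equipment_type_py_alt,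
      pvScan, pvAddressRanges, if_neg h]
    split_ifs <;> first | rfl | omega

-- ===== VERDICT (by name: the statement is the Claim_ definition above) =====
theorem map_address_to_equipment_type_py_spec : Claim_equal_map_address_to_equipment_type_py := by
  intro s _
  exact pv_eq s
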